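-- pv_equiv track=rewrite | github.com/vaibhavagarwal14/Leetcode_Coding_Solutions | Surround the 1's - GFG/surround-the-1s.py | Count
-- ===== SOURCE A (Python) =====
-- def Count(matrix):
-- 	# Code here
-- 	count=0
-- 	row=[-1,-1,0,1,1,1,0,-1]
-- 	col=[0,1,1,1,0,-1,-1,-1]
-- 	n=len(matrix)
-- 	m=len(matrix[0])
-- 	for i in range(n):
-- 	    for j in range(m):
-- 	        if matrix[i][j]==1:
-- 	            zero=0
-- 	            for k in range(8):
-- 	                r=i+row[k]
-- 	                c=j+col[k]
-- 	                if r>=0 and r<n and c>=0 and c<m and matrix[r][c]==0: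
-- 	                    zero+=1
-- 	            if zero>0 and zero%2==0:
-- 	                count+=1
-- 	return count
-- ===== SOURCE B (Python) =====
-- def Count(matrix):
--     n = len(matrix)
--     m = len(matrix[0])
--     # integral image: P[i][j] = number of zeros in matrix[:i], columns [:j]
--     P = [[0] * (m + 1)]
--     for row in matrix:
--         prev = P[-1]
--         cur = [0]
--         for j in range(m):
--             cur.append(prev[j + 1] + cur[j] - prev[j] + (row[j] == 0))
--         P.append(cur)
--     count = 0
--     for i in range(n):
--         for j in range(m):
--             if matrix[i][j] == 1:
--                 zeros = (P[min(n, i + 2)][min(m, j + 2)]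
--                          - P[max(0, i - 1)][min(m, j + 2)]
--                          - P[min(n, i + 2)][max(0, j - 1)]
--                          + P[max(0, i - 1)][max(0, j - 1)])
--                 if zeros > 0 and zeros % 2 == 0:
--                     count += 1
--     return count
-- ===== Notes on version B (the rewrite author's own statement) =====
-- stated objective: alternative
-- what changed: B precomputes a 2D prefix-sum (integral image) table of zero-indicators in one pass, then answers each 1-cell's zero-neighbor count with a single O(1) four-corner rectangle query over the clamped 3x3 block (the center contributes nothing since it is 1), replacing A's per-cell loop over eight direction-offset probes with bounds checks.
import Mathlib
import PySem

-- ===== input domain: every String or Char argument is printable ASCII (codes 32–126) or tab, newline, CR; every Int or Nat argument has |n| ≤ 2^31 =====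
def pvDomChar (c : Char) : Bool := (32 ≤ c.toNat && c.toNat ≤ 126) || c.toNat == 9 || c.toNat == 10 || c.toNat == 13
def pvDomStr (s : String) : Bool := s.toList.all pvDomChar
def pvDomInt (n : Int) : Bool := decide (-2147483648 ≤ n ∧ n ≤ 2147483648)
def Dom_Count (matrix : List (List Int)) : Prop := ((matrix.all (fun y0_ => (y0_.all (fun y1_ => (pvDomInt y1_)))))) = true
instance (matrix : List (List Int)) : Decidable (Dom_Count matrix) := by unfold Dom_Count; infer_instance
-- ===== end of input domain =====

-- B replaces A's eight direction-vector probes by a precomputed 2D prefix-sum (integral image)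
-- of zero-indicators, answering each cell's clamped 3x3 zero count by a four-corner rectangle
-- query; objective: alternative (a different data structure), not claimed faster.

-- ===== PORT A =====
-- len(matrix[0]) raises on [] (excluded by Pre_); headD stands for matrix[0] there.
-- r.toNat/c.toNat are guarded by 0 ≤ r / 0 ≤ c in the same condition, so they are exact.
def Count (matrix : List (List Int)) : Int :=
  let row : List Int := [-1, -1, 0, 1, 1, 1, 0, -1]
  let col : List Int := [0, 1, 1, 1, 0, -1, -1, -1]
  let n := matrix.length
  let m := (matrix.headD []).length
  (List.range n).foldl (fun count i =>
    (List.range m).foldl (fun count (j : Nat) =>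
      if (matrix.getD i []).getD j 0 = 1 then
        let zero : Int := (List.range 8).foldl (fun zero k =>
          let r : Int := (i : Int) + row.getD k 0
          let c : Int := (j : Int) + col.getD k 0
          if 0 ≤ r ∧ r < (n : Int) ∧ 0 ≤ c ∧ c < (m : Int) ∧
              (matrix.getD r.toNat []).getD c.toNat 0 = 0
          then zero + 1 else zero) 0
        if 0 < zero ∧ zero % 2 = 0 then count + 1 else count
      else count) count) 0

-- ===== PORT B =====
-- inner loop of the table build: cur starts as [0], appends prev[j+1]+cur[j]-prev[j]+(row[j]==0);
-- row[j] with j < m ≤ len(row) under Pre_ — getD stands for that in-range index,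
-- and Python's bool-in-arithmetic (row[j]==0) is the if-then-1-else-0.
def pvCur (prev row : List Int) (m : Nat) : List Int :=
  (List.range m).foldl (fun cur j =>
    cur ++ [prev.getD (j + 1) 0 + cur.getD j 0 - prev.getD j 0 +
      (if row.getD j 0 = 0 then 1 else 0)]) [0]

-- P[-1] on the always-nonempty P is getLastD; the P/matrix index expressions are nonnegative
-- ints in Python, so .toNat is exact.
def Count_alt (matrix : List (List Int)) : Int :=
  let n := matrix.length
  let m := (matrix.headD []).length
  let P := matrix.foldl (fun P row => P ++ [pvCur (P.getLastD []) row m])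
    [List.replicate (m + 1) 0]
  (List.range n).foldl (fun count i =>
    (List.range m).foldl (fun count (j : Nat) =>
      if (matrix.getD i []).getD j 0 = 1 then
        let zeros : Int :=
          (P.getD (min (n : Int) ((i : Int) + 2)).toNat []).getD (min (m : Int) ((j : Int) + 2)).toNat 0
          - (P.getD (max 0 ((i : Int) - 1)).toNat []).getD (min (m : Int) ((j : Int) + 2)).toNat 0
          - (P.getD (min (n : Int) ((i : Int) + 2)).toNat []).getD (max 0 ((j : Int) - 1)).toNat 0
          + (P.getD (max 0 ((i : Int) - 1)).toNat []).getD (max 0 ((j : Int) - 1)).toNat 0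
        if 0 < zeros ∧ zeros % 2 = 0 then count + 1 else count
      else count) count) 0

-- ===== PRECONDITION & SPEC =====
-- Pre_ excludes exactly the inputs on which A raises IndexError: the empty matrix
-- (len(matrix[0])) and matrices with a row shorter than the first row (matrix[i][j], j < m).
def Pre_Count (matrix : List (List Int)) : Prop :=
  matrix ≠ [] ∧ ∀ r ∈ matrix, (matrix.headD []).length ≤ r.length
instance (matrix : List (List Int)) : Decidable (Pre_Count matrix) := by
  unfold Pre_Count; infer_instance
def pvWitness_Count : List (List Int) := [[1, 0], [0, 1]]

def Spec_Count (matrix : List (List Int)) (out : Int) : Prop := out = Count_alt matrix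
instance (matrix : List (List Int)) (out : Int) : Decidable (Spec_Count matrix out) := by
  unfold Spec_Count; infer_instance

-- ===== CLAIM (what is proved, stated in full; the proofs are below) =====
def Claim_equal_Count : Prop :=
  ∀ (matrix : List (List Int)), Dom_Count matrix → Pre_Count matrix → Spec_Count matrix (Count matrix)

-- ===== LEMMAS AND PROOFS =====

-- zero-indicator of one cell, addressed by Nat coordinates (proof helper)
def pvInd (matrix : List (List Int)) (r j : Nat) : Int :=
  if (matrix.getD r []).getD j 0 = 0 then 1 else 0

-- zeros among the first c entries of row r
def pvZrow (matrix : List (List Int)) (r c : Nat) : Int :=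
  ((List.range c).map (pvInd matrix r)).sum

-- the integral image value: zeros in the rectangle of the first i rows, first k columns
def pvZval (matrix : List (List Int)) (i k : Nat) : Int :=
  ((List.range i).map (fun r => pvZrow matrix r k)).sum

-- row i of the table B builds
def pvZtab (matrix : List (List Int)) (m i : Nat) : List Int :=
  (List.range (m + 1)).map (fun k => pvZval matrix i k)

-- zero-indicator for A's guarded neighbour probe (proof helper)
def zind (matrix : List (List Int)) (r c : Int) : Int :=
  if 0 ≤ r ∧ r < (matrix.length : Int) ∧ 0 ≤ c ∧ c < ((matrix.headD []).length : Int) ∧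
      (matrix.getD r.toNat []).getD c.toNat 0 = 0
  then 1 else 0

theorem ite_add_one {C : Prop} [Decidable C] (z : Int) :
    (if C then z + 1 else z) = z + (if C then 1 else 0) := by
  split <;> ring

-- A's 8-probe fold as a sum of indicators
theorem Afold (matrix : List (List Int)) (i j : Nat) :
    (List.range 8).foldl (fun zero k =>
        let r : Int := (i : Int) + ([-1, -1, 0, 1, 1, 1, 0, -1] : List Int).getD k 0
        let c : Int := (j : Int) + ([0, 1, 1, 1, 0, -1, -1, -1] : List Int).getD k 0
        if 0 ≤ r ∧ r < (matrix.length : Int) ∧ 0 ≤ c ∧ c < ((matrix.headD []).length : Int) ∧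
            (matrix.getD r.toNat []).getD c.toNat 0 = 0
        then zero + 1 else zero) 0
    = ((zind matrix ((i : Int) - 1) ((j : Int) - 1) + zind matrix ((i : Int) - 1) (j : Int)
        + zind matrix ((i : Int) - 1) ((j : Int) + 1))
      + (zind matrix (i : Int) ((j : Int) - 1) + zind matrix (i : Int) (j : Int)
        + zind matrix (i : Int) ((j : Int) + 1))
      + (zind matrix ((i : Int) + 1) ((j : Int) - 1) + zind matrix ((i : Int) + 1) (j : Int)
        + zind matrix ((i : Int) + 1) ((j : Int) + 1)))
      - zind matrix (i : Int) (j : Int) := by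
  rw [show List.range 8 = [0, 1, 2, 3, 4, 5, 6, 7] from rfl]
  simp only [List.foldl_cons, List.foldl_nil, List.getD]
  norm_num
  simp only [ite_add_one, zind]
  norm_num [sub_eq_add_neg]
  ring

-- row r out of range: all its indicators vanish
theorem zind_row_out (matrix : List (List Int)) (r c : Int)
    (h : r < 0 ∨ (matrix.length : Int) ≤ r) : zind matrix r c = 0 := by
  simp only [zind]
  rw [if_neg]
  rintro ⟨h1, h2, -⟩
  omega

-- column c out of range: the indicator vanishes
theorem zind_col_out (matrix : List (List Int)) (r c : Int)
    (h : c < 0 ∨ ((matrix.headD []).length : Int) ≤ c) : zind matrix r c = 0 := by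
  simp only [zind]
  rw [if_neg]
  rintro ⟨-, -, h1, h2, -⟩
  omega

-- in-range indicator = pvInd
theorem zind_eq_ind (matrix : List (List Int)) (r c : Nat)
    (hr : r < matrix.length) (hc : c < (matrix.headD []).length) :
    zind matrix (r : Int) (c : Int) = pvInd matrix r c := by
  simp only [zind, pvInd, Int.toNat_natCast]
  by_cases h : (matrix.getD r []).getD c 0 = 0
  · rw [if_pos ⟨by positivity, by exact_mod_cast hr, by positivity, by exact_mod_cast hc, h⟩,
        if_pos h]
  · rw [if_neg (by rintro ⟨-, -, -, -, hh⟩; exact h hh), if_neg h]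

-- getD of a map over a range
theorem getD_map_range {α : Type} (d : α) (f : Nat → α) {k t : Nat} (h : t < k) :
    ((List.range k).map f).getD t d = f t := by
  rw [List.getD_eq_getElem _ _ (by simpa using h)]
  simp

-- splitting a sum over a range
theorem range_sum_split (f : Nat → Int) (a b : Nat) :
    ((List.range (a + b)).map f).sum
      = ((List.range a).map f).sum + ((List.range b).map (fun t => f (a + t))).sum := by
  induction b with
  | zero => simp
  | succ b ih =>
    rw [show a + (b + 1) = (a + b) + 1 from by omega, List.range_succ, List.range_succ,
        List.map_append, List.map_append, List.sum_append, List.sum_append, ih]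
    simp only [List.map_cons, List.map_nil, List.sum_cons, List.sum_nil]
    ring

theorem range_sum_sub (f : Nat → Int) {a b : Nat} (h : a ≤ b) :
    ((List.range b).map f).sum - ((List.range a).map f).sum
      = ((List.range (b - a)).map (fun t => f (a + t))).sum := by
  have h2 := range_sum_split f a (b - a)
  rw [show a + (b - a) = b from by omega] at h2
  rw [h2]; ring

theorem range_sum_sub_fun (f g : Nat → Int) (k : Nat) :
    ((List.range k).map f).sum - ((List.range k).map g).sum
      = ((List.range k).map (fun t => f t - g t)).sum := by
  induction k with
  | zero => simp
  | succ k ih => rw [List.range_succ]; simp; linarith [ih]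

theorem map_range_concat {α : Type} (f : Nat → α) (k : Nat) :
    (List.range (k + 1)).map f = (List.range k).map f ++ [f k] := by
  rw [List.range_succ, List.map_append]; rfl

-- closed form of the table-build inner loop
theorem pvCur_spec (row prev : List Int) :
    ∀ m : Nat, pvCur prev row m
      = (List.range (m + 1)).map (fun k => prev.getD k 0 - prev.getD 0 0 +
          ((List.range k).map (fun j => if row.getD j 0 = 0 then (1 : Int) else 0)).sum) := by
  intro m
  induction m with
  | zero => simp [pvCur]
  | succ m ih =>
    rw [pvCur, List.range_succ, List.foldl_append, ← pvCur, ih]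
    simp only [List.foldl_cons, List.foldl_nil]
    rw [getD_map_range 0 _ (by omega)]
    rw [show (List.range (m + 1 + 1)) = List.range (m + 1) ++ [m + 1] from List.range_succ]
    rw [List.map_append]
    congr 1
    simp only [List.map_cons, List.map_nil]
    congr 1
    rw [show (List.range (m + 1)) = List.range m ++ [m] from List.range_succ]
    simp
    ring

theorem pvZval_zero (matrix : List (List Int)) (k : Nat) : pvZval matrix 0 k = 0 := by
  simp [pvZval]

theorem pvZval_zero_col (matrix : List (List Int)) (i : Nat) : pvZval matrix i 0 = 0 := by
  simp [pvZval, pvZrow]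

theorem pvZval_succ (matrix : List (List Int)) (i k : Nat) :
    pvZval matrix (i + 1) k = pvZval matrix i k + pvZrow matrix i k := by
  simp [pvZval, List.range_succ]

-- one build step maps table row i to table row i+1
theorem pvCur_Ztab (matrix : List (List Int)) (m i : Nat) :
    pvCur (pvZtab matrix m i) (matrix.getD i []) m = pvZtab matrix m (i + 1) := by
  rw [pvCur_spec]
  unfold pvZtab
  apply List.map_congr_left
  intro k hk
  rw [List.mem_range] at hk
  rw [getD_map_range (0 : Int) (fun k => pvZval matrix i k) hk,
      getD_map_range (0 : Int) (fun k => pvZval matrix i k) (show 0 < m + 1 by omega),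
      pvZval_zero_col, pvZval_succ]
  have : ((List.range k).map (fun j => if (matrix.getD i []).getD j 0 = 0 then (1 : Int) else 0)).sum
      = pvZrow matrix i k := by
    simp only [pvZrow]; rfl
  rw [this]; ring

theorem getLastD_map_range_succ {α : Type} (d : α) (f : Nat → α) (k : Nat) :
    ((List.range (k + 1)).map f).getLastD d = f k := by
  rw [List.range_succ, List.map_append]
  simp

-- the fold builds exactly the prefix-sum table
theorem buildP (M : List (List Int)) (m : Nat) :
    ∀ (suf pre : List (List Int)), pre ++ suf = M →
      suf.foldl (fun P row => P ++ [pvCur (P.getLastD []) row m])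
          ((List.range (pre.length + 1)).map (pvZtab M m))
        = (List.range (M.length + 1)).map (pvZtab M m) := by
  intro suf
  induction suf with
  | nil =>
    intro pre h
    rw [List.append_nil] at h
    subst h
    rfl
  | cons r rest ih =>
    intro pre h
    rw [List.foldl_cons, getLastD_map_range_succ]
    have hr : r = M.getD pre.length [] := by
      rw [← h, List.getD_eq_getElem _ _ (by simp only [List.length_append, List.length_cons]; omega)]
      simp [List.getElem_append_right (le_refl pre.length)]
    rw [hr, pvCur_Ztab, ← map_range_concat (pvZtab M m) (pre.length + 1)]
    have := ih (pre ++ [r]) (by simpa using h)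
    simpa using this

theorem buildP_full (M : List (List Int)) (m : Nat) :
    M.foldl (fun P row => P ++ [pvCur (P.getLastD []) row m]) [List.replicate (m + 1) 0]
      = (List.range (M.length + 1)).map (pvZtab M m) := by
  have h0 : [List.replicate (m + 1) 0] = (List.range (0 + 1)).map (pvZtab M m) := by
    simp [pvZtab, pvZval_zero, List.map_const']
  rw [h0]
  exact buildP M m M [] rfl

-- table lookup = integral image value
theorem tab_lookup (M : List (List Int)) (m R C : Nat) (hR : R ≤ M.length) (hC : C ≤ m) :
    (((List.range (M.length + 1)).map (pvZtab M m)).getD R []).getD C 0 = pvZval M R C := by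
  rw [getD_map_range _ _ (by omega), pvZtab, getD_map_range _ _ (by omega)]

-- one row's contribution to the clamped query, as three guarded indicators
theorem rowq (M : List (List Int)) (r j : Nat) (hr : r < M.length)
    (hj : j < (M.headD []).length) :
    pvZrow M r (min (M.headD []).length (j + 2)) - pvZrow M r (j - 1)
      = zind M (r : Int) ((j : Int) - 1) + zind M (r : Int) (j : Int)
        + zind M (r : Int) ((j : Int) + 1) := by
  set m := (M.headD []).length with hm
  have hsub := range_sum_sub (pvInd M r) (a := j - 1) (b := min m (j + 2)) (by omega)
  rw [pvZrow, pvZrow, hsub]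
  rcases Nat.eq_zero_or_pos j with rfl | hj1
  · rw [zind_col_out M _ _ (Or.inl (by norm_num))]
    by_cases h2 : 2 ≤ m
    · rw [show min m (0 + 2) - (0 - 1) = 2 from by omega, show List.range 2 = [0, 1] from rfl]
      simp only [List.map_cons, List.map_nil, List.sum_cons, List.sum_nil]
      rw [show (((0 : Nat) : Int)) = ((0 : Nat) : Int) from rfl,
          show ((0 : Nat) : Int) + 1 = ((1 : Nat) : Int) from by norm_num,
          zind_eq_ind M r 0 hr (by omega), zind_eq_ind M r 1 hr (by omega)]
      norm_num
    · rw [show min m (0 + 2) - (0 - 1) = 1 from by omega, show List.range 1 = [0] from rfl,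
          zind_col_out M _ (((0 : Nat) : Int) + 1) (Or.inr (by omega))]
      simp only [List.map_cons, List.map_nil, List.sum_cons, List.sum_nil]
      rw [zind_eq_ind M r 0 hr (by omega)]
      norm_num
  · by_cases h2 : j + 2 ≤ m
    · rw [show min m (j + 2) - (j - 1) = 3 from by omega, show List.range 3 = [0, 1, 2] from rfl]
      simp only [List.map_cons, List.map_nil, List.sum_cons, List.sum_nil]
      rw [show (j : Int) - 1 = ((j - 1 : Nat) : Int) from by omega,
          show (j : Int) + 1 = ((j + 1 : Nat) : Int) from by omega,
          zind_eq_ind M r (j - 1) hr (by omega), zind_eq_ind M r j hr (by omega),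
          zind_eq_ind M r (j + 1) hr (by omega),
          show j - 1 + 0 = j - 1 from by omega, show j - 1 + 1 = j from by omega,
          show j - 1 + 2 = j + 1 from by omega]
      ring
    · rw [show min m (j + 2) - (j - 1) = 2 from by omega, show List.range 2 = [0, 1] from rfl,
          zind_col_out M _ ((j : Int) + 1) (Or.inr (by omega))]
      simp only [List.map_cons, List.map_nil, List.sum_cons, List.sum_nil]
      rw [show (j : Int) - 1 = ((j - 1 : Nat) : Int) from by omega,
          zind_eq_ind M r (j - 1) hr (by omega), zind_eq_ind M r j hr (by omega),
          show j - 1 + 0 = j - 1 from by omega, show j - 1 + 1 = j from by omega]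
      ring

-- the four-corner query equals the nine guarded indicators of the 3x3 block
theorem celllem (M : List (List Int)) (i j : Nat) (hi : i < M.length)
    (hj : j < (M.headD []).length) :
    pvZval M (min M.length (i + 2)) (min (M.headD []).length (j + 2))
      - pvZval M (i - 1) (min (M.headD []).length (j + 2))
      - pvZval M (min M.length (i + 2)) (j - 1)
      + pvZval M (i - 1) (j - 1)
    = (zind M ((i : Int) - 1) ((j : Int) - 1) + zind M ((i : Int) - 1) (j : Int)
        + zind M ((i : Int) - 1) ((j : Int) + 1))
      + (zind M (i : Int) ((j : Int) - 1) + zind M (i : Int) (j : Int)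
        + zind M (i : Int) ((j : Int) + 1))
      + (zind M ((i : Int) + 1) ((j : Int) - 1) + zind M ((i : Int) + 1) (j : Int)
        + zind M ((i : Int) + 1) ((j : Int) + 1)) := by
  set n := M.length with hn
  set m := (M.headD []).length with hm
  set d := min m (j + 2) with hd
  set c := j - 1 with hc
  have hrowsum : ∀ k : Nat, pvZval M (min n (i + 2)) k - pvZval M (i - 1) k
      = ((List.range (min n (i + 2) - (i - 1))).map (fun t => pvZrow M (i - 1 + t) k)).sum := by
    intro k
    exact range_sum_sub (fun r => pvZrow M r k) (by omega)
  have key : pvZval M (min n (i + 2)) d - pvZval M (i - 1) d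
      - pvZval M (min n (i + 2)) c + pvZval M (i - 1) c
      = ((List.range (min n (i + 2) - (i - 1))).map
          (fun t => pvZrow M (i - 1 + t) d - pvZrow M (i - 1 + t) c)).sum := by
    rw [show pvZval M (min n (i + 2)) d - pvZval M (i - 1) d
        - pvZval M (min n (i + 2)) c + pvZval M (i - 1) c
      = (pvZval M (min n (i + 2)) d - pvZval M (i - 1) d)
        - (pvZval M (min n (i + 2)) c - pvZval M (i - 1) c) from by ring,
      hrowsum d, hrowsum c, range_sum_sub_fun]
  rw [key]
  have hrq : ∀ t : Nat, i - 1 + t < n →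
      pvZrow M (i - 1 + t) d - pvZrow M (i - 1 + t) c
        = zind M ((i - 1 + t : Nat) : Int) ((j : Int) - 1)
          + zind M ((i - 1 + t : Nat) : Int) (j : Int)
          + zind M ((i - 1 + t : Nat) : Int) ((j : Int) + 1) := by
    intro t ht
    exact rowq M (i - 1 + t) j ht hj
  rcases Nat.eq_zero_or_pos i with rfl | hi1
  · rw [zind_row_out M (((0 : Nat) : Int) - 1) _ (Or.inl (by norm_num)),
        zind_row_out M (((0 : Nat) : Int) - 1) _ (Or.inl (by norm_num)),
        zind_row_out M (((0 : Nat) : Int) - 1) _ (Or.inl (by norm_num))]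
    by_cases h2 : 2 ≤ n
    · rw [show min n (0 + 2) - (0 - 1) = 2 from by omega, show List.range 2 = [0, 1] from rfl]
      simp only [List.map_cons, List.map_nil, List.sum_cons, List.sum_nil]
      rw [hrq 0 (by omega), hrq 1 (by omega)]
      push_cast
      ring
    · rw [show min n (0 + 2) - (0 - 1) = 1 from by omega, show List.range 1 = [0] from rfl,
          zind_row_out M (((0 : Nat) : Int) + 1) _ (Or.inr (by omega)),
          zind_row_out M (((0 : Nat) : Int) + 1) _ (Or.inr (by omega)),
          zind_row_out M (((0 : Nat) : Int) + 1) _ (Or.inr (by omega))]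
      simp only [List.map_cons, List.map_nil, List.sum_cons, List.sum_nil]
      rw [hrq 0 (by omega)]
      push_cast
      ring
  · by_cases h2 : i + 2 ≤ n
    · rw [show min n (i + 2) - (i - 1) = 3 from by omega, show List.range 3 = [0, 1, 2] from rfl]
      simp only [List.map_cons, List.map_nil, List.sum_cons, List.sum_nil]
      rw [hrq 0 (by omega), hrq 1 (by omega), hrq 2 (by omega),
          show ((i - 1 + 0 : Nat) : Int) = (i : Int) - 1 from by omega,
          show ((i - 1 + 1 : Nat) : Int) = (i : Int) from by omega,
          show ((i - 1 + 2 : Nat) : Int) = (i : Int) + 1 from by omega]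
      ring
    · rw [show min n (i + 2) - (i - 1) = 2 from by omega, show List.range 2 = [0, 1] from rfl,
          zind_row_out M ((i : Int) + 1) _ (Or.inr (by omega)),
          zind_row_out M ((i : Int) + 1) _ (Or.inr (by omega)),
          zind_row_out M ((i : Int) + 1) _ (Or.inr (by omega))]
      simp only [List.map_cons, List.map_nil, List.sum_cons, List.sum_nil]
      rw [hrq 0 (by omega), hrq 1 (by omega),
          show ((i - 1 + 0 : Nat) : Int) = (i : Int) - 1 from by omega,
          show ((i - 1 + 1 : Nat) : Int) = (i : Int) from by omega]
      ring

-- ===== VERDICT (by name: the statement is the Claim_ definition above) =====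
theorem Count_spec : Claim_equal_Count := by
  intro matrix _ hpre
  show Count matrix = Count_alt matrix
  simp only [Count, Count_alt, buildP_full]
  apply PySem.List.foldl_congr_mem
  intro acc i hi
  rw [List.mem_range] at hi
  apply PySem.List.foldl_congr_mem
  intro acc2 j hj
  rw [List.mem_range] at hj
  by_cases hv : (matrix.getD i []).getD j 0 = 1
  · simp only [if_pos hv]
    have hR2 : (min (matrix.length : Int) ((i : Int) + 2)).toNat = min matrix.length (i + 2) := by
      omega
    have hR1 : (max 0 ((i : Int) - 1)).toNat = i - 1 := by omega
    have hC2 : (min ((matrix.headD []).length : Int) ((j : Int) + 2)).toNat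
        = min (matrix.headD []).length (j + 2) := by omega
    have hC1 : (max 0 ((j : Int) - 1)).toNat = j - 1 := by omega
    rw [hR2, hR1, hC2, hC1,
        tab_lookup _ _ _ _ (by omega) (by omega), tab_lookup _ _ _ _ (by omega) (by omega),
        tab_lookup _ _ _ _ (by omega) (by omega), tab_lookup _ _ _ _ (by omega) (by omega),
        celllem matrix i j hi hj]
    have hc : zind matrix (i : Int) (j : Int) = 0 := by
      simp only [zind, Int.toNat_natCast]
      rw [if_neg]
      rintro ⟨-, -, -, -, h⟩
      rw [hv] at h
      exact absurd h (by norm_num)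
    rw [Afold, hc]
    norm_num
  · simp only [if_neg hv]
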